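-- pv_equiv track=rewrite | github.com/RohanS14/neutrophilCount | Scripts/neuAnalysis.py | getNeuAtypes
-- ===== SOURCE A (Python) =====
-- def getNeuAtypes(atype, tn):
--     ahash = {}
--     if tn == 1:
--         atypes = ['Other', 'Eosinophil']
--         for title in atype[2:]:
--             if 'Eosinophil' in title:
--                 ahash[title] = 1
--             else:
--                 ahash[title] = 0
--     elif tn == 2:
--         atypes = ['Other', 'Neutrophil']
--         for title in atype[2:]:
--             if 'Neutrophil' in title:
--                 ahash[title] = 1
--             else:
--                 ahash[title] = 0
--     elif tn == 3:
--         atypes = ['Other', 'Eosinophil', 'Neutrophil']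
--         for title in atype[2:]:
--             if 'Neutrophil' in title:
--                 ahash[title] = 2
--             elif 'Eosinophil' in title:
--                 ahash[title] = 1
--             else:
--                 ahash[title] = 0
--     elif tn == 4:
--         atypes = ['Other', 'Neutrophil', 'Eosinophil']
--         for title in atype[2:]:
--             if 'Neutrophil' in title:
--                 ahash[title] = 1
--             elif 'Eosinophil' in title:
--                 ahash[title] = 2
--             else:
--                 ahash[title] = 0
--     elif tn == 5:
--         atypes = ['Other', 'Neutrophil', 'Basophil']
--         for title in atype[2:]:
--             if 'neutrophil' in title:
--                 ahash[title] = 1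
--             elif 'basophil' in title:
--                 ahash[title] = 2
--             else:
--                 ahash[title] = 0
--     else:
--         atypes = ['Other', 'Neutrophil']
--         for title in atype[2:]:
--             if 'neutrophil' in title:
--                 ahash[title] = 1
--             else:
--                 ahash[title] = 0
--     return ahash, atypes
-- ===== SOURCE B (Python) =====
-- _LABELS = {1: ['Other', 'Eosinophil'], 2: ['Other', 'Neutrophil'],
--            3: ['Other', 'Eosinophil', 'Neutrophil'],
--            4: ['Other', 'Neutrophil', 'Eosinophil'],
--            5: ['Other', 'Neutrophil', 'Basophil']}
-- # substring rules in ASCENDING priority: each later pass overwrites the earlier ones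
-- _RULES = {1: [('Eosinophil', 1)], 2: [('Neutrophil', 1)],
--           3: [('Eosinophil', 1), ('Neutrophil', 2)],
--           4: [('Eosinophil', 2), ('Neutrophil', 1)],
--           5: [('basophil', 2), ('neutrophil', 1)]}
--
-- def getNeuAtypes(atype, tn):
--     titles = atype[2:]
--     ahash = dict.fromkeys(titles, 0)
--     for sub, val in _RULES.get(tn, [('neutrophil', 1)]):
--         for title in titles:
--             if sub in title:
--                 ahash[title] = val
--     return ahash, list(_LABELS.get(tn, ['Other', 'Neutrophil']))
-- ===== Notes on version B (the rewrite author's own statement) =====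
-- stated objective: simpler
-- what changed: A classifies each title with a per-tn if/elif first-match chain inside six duplicated loops; B instead initialises every title to 0 with dict.fromkeys and then runs one overwrite pass per substring rule in ascending priority (rules-outer, titles-inner), so the highest-priority matching rule wins by overwriting last.
import Mathlib
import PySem

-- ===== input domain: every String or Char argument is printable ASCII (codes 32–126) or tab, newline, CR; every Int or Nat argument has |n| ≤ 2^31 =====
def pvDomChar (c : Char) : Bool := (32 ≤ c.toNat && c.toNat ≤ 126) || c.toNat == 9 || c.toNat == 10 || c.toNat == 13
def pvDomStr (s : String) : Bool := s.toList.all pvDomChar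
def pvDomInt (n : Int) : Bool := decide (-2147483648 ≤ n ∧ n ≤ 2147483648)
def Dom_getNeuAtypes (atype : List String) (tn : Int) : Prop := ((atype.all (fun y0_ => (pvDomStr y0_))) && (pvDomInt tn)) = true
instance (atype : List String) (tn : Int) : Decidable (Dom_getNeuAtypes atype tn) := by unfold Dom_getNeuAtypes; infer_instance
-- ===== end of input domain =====

-- B replaces A's per-title first-match if/elif chains by staged overwrite passes — all titles
-- start at 0, then one pass per rule in ascending priority overwrites matches — simpler, same cost.

-- ===== PORT A =====
-- literal transliteration: each branch builds its own dict in one pass with its own nested if-chain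
def getNeuAtypes (atype : List String) (tn : Int) : (List (String × Int)) × List String :=
  if tn = 1 then
    (((PySem.List.slice atype (some 2) none).foldl
        (fun d title => d.insert title (if PySem.Str.isIn "Eosinophil" title then 1 else 0))
        PySem.Dict.empty).items, ["Other", "Eosinophil"])
  else if tn = 2 then
    (((PySem.List.slice atype (some 2) none).foldl
        (fun d title => d.insert title (if PySem.Str.isIn "Neutrophil" title then 1 else 0))
        PySem.Dict.empty).items, ["Other", "Neutrophil"])
  else if tn = 3 then
    (((PySem.List.slice atype (some 2) none).foldl
        (fun d title => d.insert title
          (if PySem.Str.isIn "Neutrophil" title then 2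
           else if PySem.Str.isIn "Eosinophil" title then 1 else 0))
        PySem.Dict.empty).items, ["Other", "Eosinophil", "Neutrophil"])
  else if tn = 4 then
    (((PySem.List.slice atype (some 2) none).foldl
        (fun d title => d.insert title
          (if PySem.Str.isIn "Neutrophil" title then 1
           else if PySem.Str.isIn "Eosinophil" title then 2 else 0))
        PySem.Dict.empty).items, ["Other", "Neutrophil", "Eosinophil"])
  else if tn = 5 then
    (((PySem.List.slice atype (some 2) none).foldl
        (fun d title => d.insert title
          (if PySem.Str.isIn "neutrophil" title then 1
           else if PySem.Str.isIn "basophil" title then 2 else 0))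
        PySem.Dict.empty).items, ["Other", "Neutrophil", "Basophil"])
  else
    (((PySem.List.slice atype (some 2) none).foldl
        (fun d title => d.insert title (if PySem.Str.isIn "neutrophil" title then 1 else 0))
        PySem.Dict.empty).items, ["Other", "Neutrophil"])

-- ===== PORT B =====
-- Source B's module tables _LABELS and _RULES (rules in ascending priority)
def pvLabels : PySem.Dict Int (List String) :=
  PySem.Dict.ofList
    [(1, ["Other", "Eosinophil"]), (2, ["Other", "Neutrophil"]),
     (3, ["Other", "Eosinophil", "Neutrophil"]), (4, ["Other", "Neutrophil", "Eosinophil"]),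
     (5, ["Other", "Neutrophil", "Basophil"])]

def pvRules : PySem.Dict Int (List (String × Int)) :=
  PySem.Dict.ofList
    [(1, [("Eosinophil", 1)]), (2, [("Neutrophil", 1)]),
     (3, [("Eosinophil", 1), ("Neutrophil", 2)]),
     (4, [("Eosinophil", 2), ("Neutrophil", 1)]),
     (5, [("basophil", 2), ("neutrophil", 1)])]

-- dict.fromkeys(titles, 0), then one overwrite pass per rule, low priority first
def getNeuAtypes_alt (atype : List String) (tn : Int) : (List (String × Int)) × List String :=
  let titles := PySem.List.slice atype (some 2) none
  let ahash0 : PySem.Dict String Int :=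
    titles.foldl (fun d t => d.insert t 0) PySem.Dict.empty
  let ahash :=
    (pvRules.getD tn [("neutrophil", 1)]).foldl
      (fun d r => titles.foldl (fun d t => if PySem.Str.isIn r.1 t then d.insert t r.2 else d) d)
      ahash0
  (ahash.items, pvLabels.getD tn ["Other", "Neutrophil"])

-- ===== PRECONDITION & SPEC =====
def Spec_getNeuAtypes (atype : List String) (tn : Int) (out : (List (String × Int)) × List String) : Prop := out = getNeuAtypes_alt atype tn
instance (atype : List String) (tn : Int) (out : (List (String × Int)) × List String) : Decidable (Spec_getNeuAtypes atype tn out) := by unfold Spec_getNeuAtypes; infer_instance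

-- ===== CLAIM (what is proved, stated in full; the proofs are below) =====
def Claim_equal_getNeuAtypes : Prop := ∀ (atype : List String) (tn : Int), Dom_getNeuAtypes atype tn → Spec_getNeuAtypes atype tn (getNeuAtypes atype tn)

-- ===== LEMMAS AND PROOFS =====

-- lookup in a dict with a value function: final value per key is the (fixed) function of the key
theorem pvGetD_fold_insertF (F : String → Int) :
    ∀ (ts : List String) (d : PySem.Dict String Int) (k : String) (d0 : Int),
      (ts.foldl (fun d t => d.insert t (F t)) d).getD k d0
        = if k ∈ ts then F k else d.getD k d0 := by
  intro ts
  induction ts with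
  | nil => intro d k d0; simp
  | cons t rest ih =>
    intro d k d0
    simp only [List.foldl_cons, ih, PySem.Dict.getD_insert, List.mem_cons]
    by_cases hr : k ∈ rest <;> by_cases hk : k = t <;> simp [hr, hk]

-- one overwrite pass: value becomes v exactly on matching keys that occur in ts
theorem pvGetD_pass (s : String) (v : Int) :
    ∀ (ts : List String) (d : PySem.Dict String Int) (k : String) (d0 : Int),
      (ts.foldl (fun d t => if PySem.Str.isIn s t then d.insert t v else d) d).getD k d0
        = if k ∈ ts ∧ PySem.Str.isIn s k then v else d.getD k d0 := by
  intro ts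
  induction ts with
  | nil => intro d k d0; simp
  | cons t rest ih =>
    intro d k d0
    rw [List.foldl_cons, ih]
    simp only [List.mem_cons]
    by_cases hr : k ∈ rest ∧ PySem.Str.isIn s k = true
    · rw [if_pos hr, if_pos ⟨Or.inr hr.1, hr.2⟩]
    · rw [if_neg hr]
      by_cases hk : k = t
      · subst hk
        by_cases hks : PySem.Str.isIn s k = true
        · rw [if_pos hks, if_pos ⟨Or.inl rfl, hks⟩, PySem.Dict.getD_insert, if_pos rfl]
        · rw [if_neg hks, if_neg (by tauto)]
      · have hne : ¬ ((k = t ∨ k ∈ rest) ∧ PySem.Str.isIn s k = true) := by tauto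
        rw [if_neg hne]
        by_cases hm : PySem.Str.isIn s t = true
        · rw [if_pos hm, PySem.Dict.getD_insert, if_neg hk]
        · rw [if_neg hm]

-- one overwrite pass keeps the key list when every inserted key is already present
theorem pvKeys_pass (s : String) (v : Int) :
    ∀ (ts : List String) (d : PySem.Dict String Int), (∀ t ∈ ts, t ∈ d.keys) →
      (ts.foldl (fun d t => if PySem.Str.isIn s t then d.insert t v else d) d).keys = d.keys := by
  intro ts
  induction ts with
  | nil => intro d _; rfl
  | cons t rest ih =>
    intro d h
    simp only [List.foldl_cons]
    by_cases hm : PySem.Str.isIn s t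
    · have hc : d.contains t = true := by
        rw [PySem.Dict.contains_iff_mem_keys]; exact h t (List.mem_cons_self ..)
      have hk : (d.insert t v).keys = d.keys := PySem.Dict.keys_insert_of_contains d v hc
      rw [if_pos hm, ih _ (by intro x hx; rw [hk]; exact h x (List.mem_cons_of_mem _ hx)), hk]
    · rw [if_neg hm, ih _ (fun x hx => h x (List.mem_cons_of_mem _ hx))]

-- the whole sequence of passes: lookup folds the rules over the starting value
theorem pvGetD_passes (titles : List String) :
    ∀ (rules : List (String × Int)) (d : PySem.Dict String Int) (k : String) (d0 : Int),
      (rules.foldl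
          (fun d r => titles.foldl (fun d t => if PySem.Str.isIn r.1 t then d.insert t r.2 else d) d)
          d).getD k d0
        = rules.foldl (fun acc r => if k ∈ titles ∧ PySem.Str.isIn r.1 k then r.2 else acc)
            (d.getD k d0) := by
  intro rules
  induction rules with
  | nil => intro d k d0; rfl
  | cons r rest ih =>
    intro d k d0
    simp only [List.foldl_cons, ih, pvGetD_pass]

theorem pvKeys_passes (titles : List String) :
    ∀ (rules : List (String × Int)) (d : PySem.Dict String Int), (∀ t ∈ titles, t ∈ d.keys) →
      (rules.foldl
          (fun d r => titles.foldl (fun d t => if PySem.Str.isIn r.1 t then d.insert t r.2 else d) d)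
          d).keys = d.keys := by
  intro rules
  induction rules with
  | nil => intro d _; rfl
  | cons r rest ih =>
    intro d h
    simp only [List.foldl_cons]
    have hk := pvKeys_pass r.1 r.2 titles d h
    rw [ih _ (by intro x hx; rw [hk]; exact h x hx), hk]

-- the master lemma: A's one-pass build equals B's staged passes whenever the per-key
-- first-match chain F agrees with folding the rule list (ascending priority) from 0
theorem pvBranch_eq (titles : List String) (F : String → Int) (rules : List (String × Int))
    (hF : ∀ t, F t = rules.foldl (fun acc r => if PySem.Str.isIn r.1 t then r.2 else acc) 0) :
    titles.foldl (fun d t => d.insert t (F t)) PySem.Dict.empty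
      = rules.foldl
          (fun d r => titles.foldl (fun d t => if PySem.Str.isIn r.1 t then d.insert t r.2 else d) d)
          (titles.foldl (fun d t => d.insert t 0) PySem.Dict.empty) := by
  apply PySem.Dict.ext
  have hkA : (titles.foldl (fun d t => d.insert t (F t)) PySem.Dict.empty).keys
      = PySem.Set.ofList titles := by
    simp [PySem.Dict.keys_foldl_insert, PySem.Set.update_nil_left]
  have hk0 : (titles.foldl (fun (d : PySem.Dict String Int) t => d.insert t 0) PySem.Dict.empty).keys
      = PySem.Set.ofList titles := by
    simp [PySem.Dict.keys_foldl_insert, PySem.Set.update_nil_left]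
  have hmem : ∀ t ∈ titles,
      t ∈ (titles.foldl (fun (d : PySem.Dict String Int) t => d.insert t 0) PySem.Dict.empty).keys := by
    intro t ht; rw [hk0, PySem.Set.mem_ofList]; exact ht
  have hkB := pvKeys_passes titles rules
    (titles.foldl (fun (d : PySem.Dict String Int) t => d.insert t 0) PySem.Dict.empty) hmem
  have hndA : (titles.foldl (fun d t => d.insert t (F t)) PySem.Dict.empty).keys.Nodup := by
    rw [hkA]; exact PySem.Set.nodup_ofList titles
  have hndB :
      ((rules.foldl
          (fun d r => titles.foldl (fun d t => if PySem.Str.isIn r.1 t then d.insert t r.2 else d) d)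
          (titles.foldl (fun d t => d.insert t 0) PySem.Dict.empty)).keys).Nodup := by
    rw [hkB, hk0]; exact PySem.Set.nodup_ofList titles
  rw [PySem.Dict.items_eq_map_keys _ hndA 0, PySem.Dict.items_eq_map_keys _ hndB 0,
      hkA, hkB, hk0]
  apply List.map_congr_left
  intro k hk
  have hkt : k ∈ titles := (PySem.Set.mem_ofList _ _).1 hk
  rw [pvGetD_fold_insertF, pvGetD_passes, pvGetD_fold_insertF, if_pos hkt, if_pos hkt, hF k]
  simp [hkt]
  rfl

-- evaluating Source B's table lookups outside 1..5
theorem pvRules_default (tn : Int) (h1 : tn ≠ 1) (h2 : tn ≠ 2) (h3 : tn ≠ 3) (h4 : tn ≠ 4)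
    (h5 : tn ≠ 5) : pvRules.getD tn [("neutrophil", 1)] = [("neutrophil", 1)] := by
  rw [show pvRules = PySem.Dict.mk
        [(1, [("Eosinophil", 1)]), (2, [("Neutrophil", 1)]),
         (3, [("Eosinophil", 1), ("Neutrophil", 2)]),
         (4, [("Eosinophil", 2), ("Neutrophil", 1)]),
         (5, [("basophil", 2), ("neutrophil", 1)])] from rfl]
  simp [PySem.Dict.getD, PySem.Dict.get?_mk_cons,
        Ne.symm h1, Ne.symm h2, Ne.symm h3, Ne.symm h4, Ne.symm h5]
  rfl

theorem pvLabels_default (tn : Int) (h1 : tn ≠ 1) (h2 : tn ≠ 2) (h3 : tn ≠ 3) (h4 : tn ≠ 4)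
    (h5 : tn ≠ 5) : pvLabels.getD tn ["Other", "Neutrophil"] = ["Other", "Neutrophil"] := by
  rw [show pvLabels = PySem.Dict.mk
        [(1, ["Other", "Eosinophil"]), (2, ["Other", "Neutrophil"]),
         (3, ["Other", "Eosinophil", "Neutrophil"]), (4, ["Other", "Neutrophil", "Eosinophil"]),
         (5, ["Other", "Neutrophil", "Basophil"])] from rfl]
  simp [PySem.Dict.getD, PySem.Dict.get?_mk_cons,
        Ne.symm h1, Ne.symm h2, Ne.symm h3, Ne.symm h4, Ne.symm h5]
  rfl

-- ===== VERDICT (by name: the statement is the Claim_ definition above) =====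
theorem getNeuAtypes_spec : Claim_equal_getNeuAtypes := by
  intro atype tn _
  unfold Spec_getNeuAtypes getNeuAtypes getNeuAtypes_alt
  by_cases h1 : tn = 1
  · subst h1
    simp only [reduceIte]
    exact congrArg₂ Prod.mk
      (congrArg PySem.Dict.items
        (pvBranch_eq (PySem.List.slice atype (some 2) none) _ [("Eosinophil", 1)]
          (fun t => rfl))) rfl
  by_cases h2 : tn = 2
  · subst h2
    simp only [reduceIte]
    exact congrArg₂ Prod.mk
      (congrArg PySem.Dict.items
        (pvBranch_eq (PySem.List.slice atype (some 2) none) _ [("Neutrophil", 1)]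
          (fun t => rfl))) rfl
  by_cases h3 : tn = 3
  · subst h3
    simp only [reduceIte]
    exact congrArg₂ Prod.mk
      (congrArg PySem.Dict.items
        (pvBranch_eq (PySem.List.slice atype (some 2) none) _
          [("Eosinophil", 1), ("Neutrophil", 2)] (fun t => rfl))) rfl
  by_cases h4 : tn = 4
  · subst h4
    simp only [reduceIte]
    exact congrArg₂ Prod.mk
      (congrArg PySem.Dict.items
        (pvBranch_eq (PySem.List.slice atype (some 2) none) _
          [("Eosinophil", 2), ("Neutrophil", 1)] (fun t => rfl))) rfl
  by_cases h5 : tn = 5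
  · subst h5
    simp only [reduceIte]
    exact congrArg₂ Prod.mk
      (congrArg PySem.Dict.items
        (pvBranch_eq (PySem.List.slice atype (some 2) none) _
          [("basophil", 2), ("neutrophil", 1)] (fun t => rfl))) rfl
  · simp only [h1, h2, h3, h4, h5, if_false]
    rw [pvRules_default tn h1 h2 h3 h4 h5, pvLabels_default tn h1 h2 h3 h4 h5]
    exact congrArg₂ Prod.mk
      (congrArg PySem.Dict.items
        (pvBranch_eq (PySem.List.slice atype (some 2) none) _ [("neutrophil", 1)]
          (fun t => rfl))) rfl
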